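-- pv_equiv track=rewrite | github.com/YChaeeun/startPython | Algorithm/Search/ex_dict_findStudent.py | findStudent
-- ===== SOURCE A (Python) =====
-- def findStudent(studentID) :
--     studentIDList = [39, 14,67,105]
--     studentNameList = ['Tina', 'Leah', 'Michelle', 'Lily']
--
--     dictStudent = dict()
--
--     for i in range(len(studentIDList)) :
--         dictStudent[studentIDList[i]] = studentNameList[i]
--
--     try :
--         return dictStudent[studentID]
--     except :
--         return '?'
-- ===== SOURCE B (Python) =====
-- def findStudent(studentID):
--     # sort the fixed roster by id, then binary-search it
--     pairs = sorted(zip([39, 14, 67, 105], ['Tina', 'Leah', 'Michelle', 'Lily']),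
--                    key=lambda p: p[0])
--     lo, hi = 0, len(pairs)
--     while lo < hi:
--         mid = (lo + hi) // 2
--         if pairs[mid][0] < studentID:
--             lo = mid + 1
--         else:
--             hi = mid
--     if lo < len(pairs) and pairs[lo][0] == studentID:
--         return pairs[lo][1]
--     return '?'
-- ===== Notes on version B (the rewrite author's own statement) =====
-- stated objective: alternative
-- what changed: Replaces building a dict with an index loop and indexing it inside try/except by sorting the (id, name) pairs by id once and locating studentID with a hand-written binary search (bisect-left loop), returning the name on an exact hit and '?' otherwise.
import Mathlib
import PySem

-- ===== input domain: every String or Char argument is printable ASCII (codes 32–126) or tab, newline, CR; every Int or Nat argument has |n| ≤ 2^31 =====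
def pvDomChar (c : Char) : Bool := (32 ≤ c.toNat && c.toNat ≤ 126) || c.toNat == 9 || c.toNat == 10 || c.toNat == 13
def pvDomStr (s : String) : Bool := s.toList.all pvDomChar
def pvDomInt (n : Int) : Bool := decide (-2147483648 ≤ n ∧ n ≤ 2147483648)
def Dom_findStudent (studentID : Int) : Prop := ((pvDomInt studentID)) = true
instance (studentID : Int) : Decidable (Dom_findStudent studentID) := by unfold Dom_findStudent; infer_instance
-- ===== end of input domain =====

-- B replaces A's dict-build-then-try/except lookup with sort-by-id + a hand-written binary search (objective: alternative).

-- ===== PORT A =====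
def findStudent (studentID : Int) : String :=
  let studentIDList : List Int := [39, 14, 67, 105]
  let studentNameList : List String := ["Tina", "Leah", "Michelle", "Lily"]
  let dictStudent : PySem.Dict Int String :=
    (PySem.List.pyRange 0 (Int.ofNat studentIDList.length) 1).foldl
      (fun d i =>
        match PySem.List.pyGet? studentIDList i, PySem.List.pyGet? studentNameList i with
        | some k, some v => d.insert k v
        | _, _ => d)  -- unreachable: i ranges over valid indices
      PySem.Dict.empty
  dictStudent.getD studentID "?"

-- ===== PORT B =====
-- the while-loop of Source B: shrink [lo, hi) to the leftmost position not below x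
def bsearchLoop (pairs : List (Int × String)) (x lo hi : Int) : Int :=
  if h : lo < hi then
    let mid := PySem.Int.floordiv (lo + hi) 2
    match PySem.List.pyGet? pairs mid with
    | some (k, _) =>
        if k < x then bsearchLoop pairs x (mid + 1) hi else bsearchLoop pairs x lo mid
    | none => lo   -- unreachable: in Source B always lo ≤ mid < hi ≤ len(pairs)
  else lo
termination_by (hi - lo).toNat
decreasing_by
  all_goals
    have := PySem.Int.floordiv_two_mid_bounds (lo := lo) (hi := hi) (le_of_lt h)
    have h2 : PySem.Int.floordiv (lo + hi) 2 < hi := by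
      rw [PySem.Int.floordiv_lt_iff_lt_mul (by norm_num)]; omega
    omega

def findStudent_alt (studentID : Int) : String :=
  let pairs : List (Int × String) :=
    PySem.List.sorted (List.zip [39, 14, 67, 105] ["Tina", "Leah", "Michelle", "Lily"])
      (fun p => p.1) false
  let lo := bsearchLoop pairs studentID 0 (Int.ofNat pairs.length)
  match PySem.List.pyGet? pairs lo with
  | some (k, name) => if k == studentID then name else "?"   -- 'lo < len(pairs) and pairs[lo][0] == studentID'
  | none => "?"

-- ===== PRECONDITION & SPEC =====
def Spec_findStudent (studentID : Int) (out : String) : Prop := out = findStudent_alt studentID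
instance (studentID : Int) (out : String) : Decidable (Spec_findStudent studentID out) := by unfold Spec_findStudent; infer_instance

-- ===== CLAIM (what is proved, stated in full; the proofs are below) =====
def Claim_equal_findStudent : Prop := ∀ (studentID : Int), Dom_findStudent studentID → Spec_findStudent studentID (findStudent studentID)

-- ===== LEMMAS AND PROOFS =====
-- A's fold builds exactly this literal dict.
theorem findStudent_eq (sid : Int) :
    findStudent sid =
      (PySem.Dict.mk [((39 : Int), "Tina"), (14, "Leah"), (67, "Michelle"), (105, "Lily")]).getD
        sid "?" := by
  unfold findStudent
  rfl

-- ===== VERDICT (by name: the statement is the Claim_ definition above) =====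
theorem findStudent_spec : Claim_equal_findStudent := by
  intro sid _
  unfold Spec_findStudent findStudent_alt
  rw [findStudent_eq]
  have hsorted :
      PySem.List.sorted (List.zip [39, 14, 67, 105] ["Tina", "Leah", "Michelle", "Lily"])
        (fun p : Int × String => p.1) false =
      [((14 : Int), "Leah"), (39, "Tina"), (67, "Michelle"), (105, "Lily")] := by
    decide
  rw [hsorted]
  -- the four members: closed evaluation
  by_cases e14 : sid = 14
  · subst e14
    simp [bsearchLoop, PySem.List.pyGet?, PySem.List.pyIdx?, PySem.Dict.getD, PySem.Dict.get?]
  by_cases e39 : sid = 39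
  · subst e39
    simp [bsearchLoop, PySem.List.pyGet?, PySem.List.pyIdx?, PySem.Dict.getD, PySem.Dict.get?]
  by_cases e67 : sid = 67
  · subst e67
    simp [bsearchLoop, PySem.List.pyGet?, PySem.List.pyIdx?, PySem.Dict.getD, PySem.Dict.get?]
  by_cases e105 : sid = 105
  · subst e105
    simp [bsearchLoop, PySem.List.pyGet?, PySem.List.pyIdx?, PySem.Dict.getD, PySem.Dict.get?]
  -- non-members: both return "?", by interval on where the search lands
  have n14 : (14 : Int) ≠ sid := fun h => e14 h.symm
  have n39 : (39 : Int) ≠ sid := fun h => e39 h.symm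
  have n67 : (67 : Int) ≠ sid := fun h => e67 h.symm
  have n105 : (105 : Int) ≠ sid := fun h => e105 h.symm
  by_cases l14 : sid < 14
  · have c14 : ¬ (14 : Int) < sid := by omega
    have c39 : ¬ (39 : Int) < sid := by omega
    have c67 : ¬ (67 : Int) < sid := by omega
    simp [bsearchLoop, PySem.List.pyGet?, PySem.List.pyIdx?, PySem.Dict.getD, PySem.Dict.get?,
      c14, c39, c67, n14, n39, n67, n105]
  by_cases l39 : sid < 39
  · have c14 : (14 : Int) < sid := by omega
    have c39 : ¬ (39 : Int) < sid := by omega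
    have c67 : ¬ (67 : Int) < sid := by omega
    simp [bsearchLoop, PySem.List.pyGet?, PySem.List.pyIdx?, PySem.Dict.getD, PySem.Dict.get?,
      c14, c39, c67, n14, n39, n67, n105]
  by_cases l67 : sid < 67
  · have c39 : (39 : Int) < sid := by omega
    have c67 : ¬ (67 : Int) < sid := by omega
    simp [bsearchLoop, PySem.List.pyGet?, PySem.List.pyIdx?, PySem.Dict.getD, PySem.Dict.get?,
      c39, c67, n14, n39, n67, n105]
  by_cases l105 : sid < 105
  · have c67 : (67 : Int) < sid := by omega
    have c105 : ¬ (105 : Int) < sid := by omega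
    simp [bsearchLoop, PySem.List.pyGet?, PySem.List.pyIdx?, PySem.Dict.getD, PySem.Dict.get?,
      c67, c105, n14, n39, n67, n105]
  · have c67 : (67 : Int) < sid := by omega
    have c105 : (105 : Int) < sid := by omega
    simp [bsearchLoop, PySem.List.pyGet?, PySem.List.pyIdx?, PySem.Dict.getD, PySem.Dict.get?,
      c67, c105, n14, n39, n67, n105]
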